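-- pv_equiv track=rewrite | github.com/Charan-013/Coding-ProblemSolving-using-Python | week 8/Day33/Exam/create_string_from_dictionary (handout)/solution.py | create_string_from_dict
-- ===== SOURCE A (Python) =====
-- def create_string_from_dict(index_dict):
--     char_at_index = {}
--
--     for char, positions in index_dict.items():
--         for pos in positions:
--             char_at_index[pos] = char
--
--
--     highest_index = -1
--     if char_at_index:
--         highest_index = max(char_at_index.keys())
--
--     result_list = []
--     for i in range(highest_index + 1):
--         result_list.append(char_at_index.get(i, " "))
--
--     result_string = "".join(result_list)
--
--     return result_string
-- ===== SOURCE B (Python) =====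
-- def create_string_from_dict(index_dict):
--     # Sort-then-scan: flatten the dict into (position, sequence, char) triples,
--     # sort them by (position, sequence), and emit the result left to right,
--     # padding gaps with spaces; within one position the last write wins.
--     triples = []
--     seq = 0
--     for char, positions in index_dict.items():
--         for pos in positions:
--             if pos >= 0:
--                 triples.append((pos, seq, char))
--             seq += 1
--     triples.sort(key=lambda t: (t[0], t[1]))
--     pieces = []
--     next_i = 0
--     for k in range(len(triples)):
--         pos, _, char = triples[k]
--         if k + 1 < len(triples) and triples[k + 1][0] == pos:
--             continue  # a later write to this position wins
--         pieces.append(" " * (pos - next_i) + char)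
--         next_i = pos + 1
--     return "".join(pieces)
-- ===== Notes on version B (the rewrite author's own statement) =====
-- stated objective: alternative
-- what changed: B replaces A's position->char hash map plus dense range(max+1) re-lookup rendering by a sort-then-scan algorithm: the assignments are flattened to (position, sequence, char) triples, sorted by (position, sequence) so that for each position the last write ends the group, and the output is emitted in one left-to-right scan that pads gaps with spaces.
import Mathlib
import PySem

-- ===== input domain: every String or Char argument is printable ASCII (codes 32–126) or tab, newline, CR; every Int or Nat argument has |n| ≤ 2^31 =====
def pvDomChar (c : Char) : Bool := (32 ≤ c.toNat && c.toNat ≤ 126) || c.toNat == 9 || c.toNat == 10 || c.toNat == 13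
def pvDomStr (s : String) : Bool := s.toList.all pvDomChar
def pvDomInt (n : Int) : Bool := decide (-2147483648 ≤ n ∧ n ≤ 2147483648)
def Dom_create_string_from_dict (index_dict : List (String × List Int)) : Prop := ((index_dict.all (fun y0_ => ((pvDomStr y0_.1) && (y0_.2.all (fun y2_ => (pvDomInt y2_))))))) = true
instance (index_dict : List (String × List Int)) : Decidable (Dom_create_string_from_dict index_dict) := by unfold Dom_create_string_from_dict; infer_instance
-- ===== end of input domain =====

-- B replaces A's position->char dict plus dense range re-lookup by a sort-then-scan
-- algorithm over (position, sequence, char) triples; proved to return the same string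
-- (objective: alternative).


-- ===== PORT A =====
def create_string_from_dict (index_dict : List (String × List Int)) : String :=
  let char_at_index : PySem.Dict Int String :=
    index_dict.foldl (fun d ci => ci.2.foldl (fun d pos => d.insert pos ci.1) d) PySem.Dict.empty
  let highest_index : Int :=
    if char_at_index.size ≠ 0 then ((PySem.List.max? char_at_index.keys (fun k => k)).getD (-1)) else -1
  let result_list : List String :=
    (PySem.List.pyRange 0 (highest_index + 1) 1).foldl
      (fun acc i => acc ++ [char_at_index.getD i " "]) []
  PySem.Str.join "" result_list

-- ===== PORT B =====
-- " " * n for an Int n (empty for n ≤ 0); exact: space is ASCII, no encoding subtlety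
def csfdSpaces (n : Int) : String := String.ofList (List.replicate n.toNat ' ')

-- the scan over the sorted triples: index loop with one-element lookahead, as in Source B
def csfdRender : List (Int × Int × String) → Int → List String → List String
  | [], _, pieces => pieces
  | t :: rest, next_i, pieces =>
    if (match rest with | t2 :: _ => decide (t2.1 = t.1) | [] => false) then
      csfdRender rest next_i pieces          -- a later write to this position wins
    else
      csfdRender rest (t.1 + 1) (pieces ++ [csfdSpaces (t.1 - next_i) ++ t.2.2])

def create_string_from_dict_alt (index_dict : List (String × List Int)) : String :=
  let tri : List (Int × Int × String) × Int :=
    index_dict.foldl (fun acc ci =>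
      ci.2.foldl (fun acc pos =>
        (if 0 ≤ pos then acc.1 ++ [(pos, acc.2, ci.1)] else acc.1, acc.2 + 1)) acc)
      ([], 0)
  let sortedTri : List (Int × Int × String) :=
    PySem.List.sorted2 tri.1 (fun t => t.1) (fun t => t.2.1)
  PySem.Str.join "" (csfdRender sortedTri 0 [])

-- ===== PRECONDITION & SPEC =====
def Spec_create_string_from_dict (index_dict : List (String × List Int)) (out : String) : Prop := out = create_string_from_dict_alt index_dict
instance (index_dict : List (String × List Int)) (out : String) : Decidable (Spec_create_string_from_dict index_dict out) := by unfold Spec_create_string_from_dict; infer_instance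

-- ===== CLAIM (what is proved, stated in full; the proofs are below) =====
def Claim_equal_create_string_from_dict : Prop := ∀ (index_dict : List (String × List Int)), Dom_create_string_from_dict index_dict → Spec_create_string_from_dict index_dict (create_string_from_dict index_dict)

-- ===== LEMMAS AND PROOFS =====

-- the flat list of (position, char) assignments, in A's processing order
def pvAsgs (index_dict : List (String × List Int)) : List (Int × String) :=
  index_dict.flatMap (fun ci => ci.2.map (fun p => (p, ci.1)))

-- the char of the LAST assignment to position j (what A's dict stores at j)
def pvLast (j : Int) (xs : List (Int × String)) : Option String :=
  xs.foldl (fun o pc => if pc.1 = j then some pc.2 else o) none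

def pvLastT (j : Int) (ts : List (Int × Int × String)) : Option String :=
  ts.foldl (fun o t => if t.1 = j then some t.2.2 else o) none

-- the triples Source B builds, with the running sequence counter
def pvTri : Int → List (Int × String) → List (Int × Int × String)
  | _, [] => []
  | k, (p, c) :: r => (if 0 ≤ p then [(p, k, c)] else []) ++ pvTri (k + 1) r

def pvM (xs : List (Int × String)) : Int := (xs.map (·.1)).foldl max (-1)

-- one past the last position the render scan covers
def pvHi (L : List (Int × Int × String)) (n : Int) : Int :=
  L.foldl (fun _ t => t.1 + 1) n

def pvLexLt (a b : Int × Int × String) : Prop := a.1 < b.1 ∨ (a.1 = b.1 ∧ a.2.1 < b.2.1)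

def pvCanonL (index_dict : List (String × List Int)) : List String :=
  (List.range ((pvM (pvAsgs index_dict)) + 1).toNat).map
    (fun (k : Nat) => (pvLast (k : Int) (pvAsgs index_dict)).getD " ")

theorem pv_foldl_nested {σ : Type} (l : List (String × List Int))
    (f : σ → Int × String → σ) (init : σ) :
    l.foldl (fun s ci => ci.2.foldl (fun s p => f s (p, ci.1)) s) init
      = (pvAsgs l).foldl f init := by
  induction l generalizing init with
  | nil => rfl
  | cons ci rest ih =>
      simp [pvAsgs, List.flatMap_cons, List.foldl_append, List.foldl_map] at *
      rw [ih]

theorem pv_dict_get? (asgs : List (Int × String)) (d : PySem.Dict Int String) (i : Int) :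
    (asgs.foldl (fun d pc => d.insert pc.1 pc.2) d).get? i
      = asgs.foldl (fun o pc => if pc.1 = i then some pc.2 else o) (d.get? i) := by
  induction asgs generalizing d with
  | nil => rfl
  | cons pc rest ih =>
      simp only [List.foldl_cons]
      rw [ih, PySem.Dict.get?_insert]
      congr 1
      by_cases h : pc.1 = i
      · simp [h]
      · rw [if_neg h, if_neg (fun e => h e.symm)]

theorem pv_optfold (asgs : List (Int × String)) (i : Int) (o : Option String) :
    asgs.foldl (fun o pc => if pc.1 = i then some pc.2 else o) o
      = (pvLast i asgs).or o := by
  unfold pvLast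
  induction asgs generalizing o with
  | nil => rfl
  | cons pc rest ih =>
      simp only [List.foldl_cons]
      rw [ih, ih (if pc.1 = i then some pc.2 else none), Option.or_assoc]
      congr 1
      by_cases h : pc.1 = i <;> simp [h]

theorem pv_optfoldT (ts : List (Int × Int × String)) (j : Int) (o : Option String) :
    ts.foldl (fun o t => if t.1 = j then some t.2.2 else o) o
      = (pvLastT j ts).or o := by
  unfold pvLastT
  induction ts generalizing o with
  | nil => rfl
  | cons t rest ih =>
      simp only [List.foldl_cons]
      rw [ih, ih (if t.1 = j then some t.2.2 else none), Option.or_assoc]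
      congr 1
      by_cases h : t.1 = j <;> simp [h]

theorem pvLastT_cons (t : Int × Int × String) (ts : List (Int × Int × String)) (j : Int) :
    pvLastT j (t :: ts) = (pvLastT j ts).or (if t.1 = j then some t.2.2 else none) := by
  show List.foldl _ _ (t :: ts) = _
  rw [List.foldl_cons, pv_optfoldT]

theorem pvLastT_append (xs ys : List (Int × Int × String)) (j : Int) :
    pvLastT j (xs ++ ys) = (pvLastT j ys).or (pvLastT j xs) := by
  show List.foldl _ _ (xs ++ ys) = _
  rw [List.foldl_append, pv_optfoldT]
  rfl

theorem pvLastT_eq_none (ts : List (Int × Int × String)) (j : Int)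
    (h : ∀ x ∈ ts, x.1 ≠ j) : pvLastT j ts = none := by
  induction ts with
  | nil => rfl
  | cons t rest ih =>
      rw [pvLastT_cons, ih (fun x hx => h x (List.mem_cons_of_mem _ hx)),
        if_neg (h t List.mem_cons_self)]
      rfl

theorem pvLastT_isSome (ts : List (Int × Int × String)) (j : Int)
    (h : ∃ x ∈ ts, x.1 = j) : (pvLastT j ts).isSome := by
  induction ts with
  | nil => simp at h
  | cons t rest ih =>
      rw [pvLastT_cons]
      rcases h with ⟨x, hx, hj⟩
      rcases List.mem_cons.1 hx with rfl | hx'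
      · cases pvLastT j rest <;> simp [Option.or, hj]
      · cases hr : pvLastT j rest
        · exact absurd (Option.isSome_iff_exists.1 (ih ⟨x, hx', hj⟩)) (by simp [hr])
        · simp [Option.or]

theorem pvLastT_filter (ts : List (Int × Int × String)) (j : Int) :
    pvLastT j ts = ((ts.filter (fun t => t.1 = j)).getLast?).map (fun t => t.2.2) := by
  induction ts using List.reverseRecOn with
  | nil => rfl
  | append_singleton ys x ih =>
      rw [pvLastT_append, ih, List.filter_append]
      by_cases h : x.1 = j
      · have hone : pvLastT j [x] = some x.2.2 := by
          rw [pvLastT_cons, if_pos h]; rfl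
        simp [h, hone, List.getLast?_concat, Option.or]
      · have hf : List.filter (fun t => decide (t.1 = j)) [x] = [] := by
          simp [h]
        have : pvLastT j [x] = none := pvLastT_eq_none _ _ (by simp [h])
        simp [hf, this, Option.or]

-- the triples fold of Source B, flattened over the assignment list
theorem pv_tri_fold (xs : List (Int × String)) (acc : List (Int × Int × String)) (k : Int) :
    xs.foldl (fun acc pc =>
        (if 0 ≤ pc.1 then acc.1 ++ [(pc.1, acc.2, pc.2)] else acc.1, acc.2 + 1)) (acc, k)
      = (acc ++ pvTri k xs, k + xs.length) := by
  induction xs generalizing acc k with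
  | nil => simp [pvTri]
  | cons pc r ih =>
      rw [List.foldl_cons]
      by_cases h : 0 ≤ pc.1
      · simp only [if_pos h]
        rw [ih]
        simp [pvTri, h, List.append_assoc]
        omega
      · simp only [if_neg h]
        rw [ih]
        simp [pvTri, h]
        omega

theorem pv_tri_mem (k : Int) (xs : List (Int × String)) :
    ∀ t ∈ pvTri k xs, 0 ≤ t.1 ∧ k ≤ t.2.1 := by
  induction xs generalizing k with
  | nil => simp [pvTri]
  | cons pc r ih =>
      intro t ht
      rcases pc with ⟨p, c⟩
      simp only [pvTri] at ht
      rcases List.mem_append.1 ht with h1 | h2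
      · by_cases hp : 0 ≤ p
        · rw [if_pos hp] at h1
          simp at h1
          subst h1
          exact ⟨hp, le_refl _⟩
        · rw [if_neg hp] at h1
          simp at h1
      · have := ih (k + 1) t h2
        exact ⟨this.1, by omega⟩

theorem pv_tri_pairwise_seq (k : Int) (xs : List (Int × String)) :
    (pvTri k xs).Pairwise (fun a b => a.2.1 < b.2.1) := by
  induction xs generalizing k with
  | nil => simp [pvTri]
  | cons pc r ih =>
      rcases pc with ⟨p, c⟩
      simp only [pvTri]
      apply List.pairwise_append.2
      refine ⟨?_, ih (k + 1), ?_⟩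
      · by_cases hp : 0 ≤ p <;> simp [hp]
      · intro a ha b hb
        have hb' := (pv_tri_mem (k + 1) r b hb).2
        by_cases hp : 0 ≤ p
        · rw [if_pos hp] at ha
          simp at ha
          subst ha
          simpa using by omega
        · rw [if_neg hp] at ha
          simp at ha

theorem pv_tri_last (xs : List (Int × String)) (k : Int) (j : Int) (hj : 0 ≤ j) :
    pvLastT j (pvTri k xs) = pvLast j xs := by
  induction xs generalizing k with
  | nil => rfl
  | cons pc r ih =>
      rcases pc with ⟨p, c⟩
      have hcons : pvLast j ((p, c) :: r) = (pvLast j r).or (if p = j then some c else none) := by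
        show List.foldl _ _ ((p, c) :: r) = _
        rw [List.foldl_cons, pv_optfold]
      simp only [pvTri]
      rw [pvLastT_append, ih (k + 1), hcons]
      congr 1
      by_cases hp : 0 ≤ p
      · rw [if_pos hp, pvLastT_cons]
        simp [pvLastT]
      · rw [if_neg hp]
        rw [if_neg (by omega : ¬ p = j)]
        rfl

-- Python's tuple key (t[0], t[1]) is the lexicographic order: sorted2 = sorted with a Lex key
theorem pv_sorted2_eq {α : Type} (xs : List α) (k1 k2 : α → Int) :
    PySem.List.sorted2 xs k1 k2 = PySem.List.sorted xs (fun a => toLex (k1 a, k2 a)) := by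
  have hb : (fun (a b : α) => decide (k1 a < k1 b) || (!decide (k1 b < k1 a) && decide (k2 a < k2 b)))
      = (fun (a b : α) => decide (toLex (k1 a, k2 a) < toLex (k1 b, k2 b))) := by
    funext a b
    by_cases h1 : k1 a < k1 b <;> by_cases h2 : k1 b < k1 a <;> by_cases h3 : k2 a < k2 b <;>
      simp [h1, h2, h3, Prod.Lex.lt_iff] <;> omega
  show List.foldl _ [] xs = List.foldl _ [] xs
  rw [hb]

theorem pv_chars_join_flatten (L : List (List Char)) :
    PySem.Chars.join [] L = L.flatten := by
  induction L with
  | nil => simp [PySem.Chars.join_nil]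
  | cons a rest ih =>
      cases rest with
      | nil => simp [PySem.Chars.join_singleton]
      | cons b r =>
          rw [PySem.Chars.join_cons_cons, ih]
          simp

theorem pv_join_toList (parts : List String) :
    (PySem.Str.join "" parts).toList = (parts.map String.toList).flatten := by
  rw [PySem.Str.toList_join]
  have h : ("" : String).toList = [] := rfl
  rw [h, pv_chars_join_flatten]

theorem pv_spaces_toList (n : Int) : (csfdSpaces n).toList = List.replicate n.toNat ' ' := by
  simp [csfdSpaces, String.toList_ofList]

theorem pv_flatten_replicate_space (a : Nat) :
    (List.replicate a ((" " : String).toList)).flatten = List.replicate a ' ' := by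
  induction a with
  | zero => rfl
  | succ m ih => simp only [List.replicate_succ, List.flatten_cons, ih]; rfl

theorem pv_or_of_isSome {α : Type} (o x : Option α) (h : o.isSome) : o.or x = o := by
  cases o with
  | none => simp at h
  | some a => rfl

theorem pv_pvHi_cases (L : List (Int × Int × String)) (n : Int) :
    pvHi L n = n ∨ ∃ x ∈ L, pvHi L n = x.1 + 1 := by
  induction L generalizing n with
  | nil => exact Or.inl rfl
  | cons t rest ih =>
      rcases ih (t.1 + 1) with h | ⟨x, hx, hh⟩
      · exact Or.inr ⟨t, List.mem_cons_self, h⟩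
      · exact Or.inr ⟨x, List.mem_cons_of_mem _ hx, hh⟩

theorem pv_render (L : List (Int × Int × String)) (n : Int) (pieces : List String)
    (h0 : 0 ≤ n) (hp : ∀ t ∈ L, n ≤ t.1) (hlt : L.Pairwise pvLexLt) :
    ((csfdRender L n pieces).map String.toList).flatten
      = (pieces.map String.toList).flatten
        ++ ((List.range ((pvHi L n) - n).toNat).map
              (fun (k : Nat) => ((pvLastT (n + (k : Int)) L).getD " ").toList)).flatten := by
  induction L generalizing n pieces with
  | nil =>
      simp [csfdRender, pvHi, pvLastT]
  | cons t rest ih =>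
      have hlt' : rest.Pairwise pvLexLt := (List.pairwise_cons.1 hlt).2
      have hhead : ∀ x ∈ rest, pvLexLt t x := (List.pairwise_cons.1 hlt).1
      have hnt : n ≤ t.1 := hp t List.mem_cons_self
      by_cases hc : (match rest with | t2 :: _ => decide (t2.1 = t.1) | [] => false) = true
      · -- skip case: the next triple writes the same position, so this one is dead
        obtain ⟨t2, r2, rfl⟩ : ∃ t2 r2, rest = t2 :: r2 := by
          cases rest with
          | nil => simp at hc
          | cons a b => exact ⟨a, b, rfl⟩
        have ht2 : t2.1 = t.1 := by simpa using hc
        have hr : csfdRender (t :: t2 :: r2) n pieces = csfdRender (t2 :: r2) n pieces := by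
          simp [csfdRender, ht2]
        rw [hr, ih n pieces h0 (fun x hx => hp x (List.mem_cons_of_mem _ hx)) hlt']
        congr 1
        have hhi : pvHi (t :: t2 :: r2) n = pvHi (t2 :: r2) n := rfl
        rw [hhi]
        congr 1
        apply List.map_congr_left
        intro k _
        congr 1
        have heq : pvLastT (n + (k : Int)) (t :: t2 :: r2) = pvLastT (n + (k : Int)) (t2 :: r2) := by
          by_cases hj : t.1 = n + (k : Int)
          · have hsome : (pvLastT (n + (k : Int)) (t2 :: r2)).isSome :=
              pvLastT_isSome _ _ ⟨t2, List.mem_cons_self, by omega⟩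
            rw [pvLastT_cons t (t2 :: r2), if_pos hj, pv_or_of_isSome _ _ hsome]
          · rw [pvLastT_cons t (t2 :: r2), if_neg hj, Option.or_none]
        rw [heq]
      · -- emit case: this triple is the last write to its position
        have hgt : ∀ x ∈ rest, t.1 < x.1 := by
          cases rest with
          | nil => intro x hx; simp at hx
          | cons t2 r2 =>
              have ht2 : ¬ t2.1 = t.1 := by simpa using hc
              have h1 : t.1 < t2.1 := by
                rcases hhead t2 List.mem_cons_self with h | ⟨he, _⟩
                · exact h
                · omega
              intro x hx
              rcases List.mem_cons.1 hx with rfl | hx'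
              · exact h1
              · rcases (List.pairwise_cons.1 hlt').1 x hx' with h | ⟨he, _⟩
                · omega
                · omega
        have hr : csfdRender (t :: rest) n pieces
            = csfdRender rest (t.1 + 1) (pieces ++ [csfdSpaces (t.1 - n) ++ t.2.2]) := by
          cases rest with
          | nil => simp [csfdRender]
          | cons t2 r2 =>
              have ht2 : ¬ t2.1 = t.1 := by simpa using hc
              simp [csfdRender, ht2]
        have hHbound : t.1 + 1 ≤ pvHi rest (t.1 + 1) := by
          rcases pv_pvHi_cases rest (t.1 + 1) with h | ⟨x, hx, hh⟩
          · omega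
          · have := hgt x hx; omega
        have hhi : pvHi (t :: rest) n = pvHi rest (t.1 + 1) := rfl
        set a : Nat := (t.1 - n).toNat with ha
        set b : Nat := (pvHi rest (t.1 + 1) - (t.1 + 1)).toNat with hb
        have hsplit : ((pvHi (t :: rest) n) - n).toNat = a + (1 + b) := by
          rw [hhi]; omega
        rw [hr, ih (t.1 + 1) _ (by omega) (fun x hx => by have := hgt x hx; omega) hlt']
        rw [hsplit, List.range_add]
        simp only [List.map_append, List.flatten_append]
        -- the first a entries are all blanks
        have hblank : ∀ k ∈ List.range a, ((pvLastT (n + (k : Int)) (t :: rest)).getD " ").toList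
            = (" " : String).toList := by
          intro k hk
          have hk' : (k : Int) < t.1 - n := by
            have := List.mem_range.1 hk; omega
          have : pvLastT (n + (k : Int)) (t :: rest) = none := by
            apply pvLastT_eq_none
            intro x hx
            rcases List.mem_cons.1 hx with rfl | hx'
            · omega
            · have := hgt x hx'; omega
          rw [this]; rfl
        rw [List.map_congr_left hblank, List.map_const', List.length_range,
          pv_flatten_replicate_space]
        have hat : pvLastT (n + ((a : Nat) : Int)) (t :: rest) = some t.2.2 := by
          rw [pvLastT_cons]
          have hnone : pvLastT (n + ((a : Nat) : Int)) rest = none := by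
            apply pvLastT_eq_none
            intro x hx
            have := hgt x hx
            omega
          rw [hnone, if_pos (by omega)]
          rfl
        have hone : List.range (1 + b) = 0 :: List.map (fun x => 1 + x) (List.range b) := by
          rw [List.range_add]; rfl
        have hmap : List.map ((fun (k : Nat) => ((pvLastT (n + (k : Int)) (t :: rest)).getD " ").toList) ∘ fun x => a + x) (List.range (1 + b))
            = t.2.2.toList :: List.map (fun (k : Nat) => ((pvLastT (t.1 + 1 + (k : Int)) rest).getD " ").toList) (List.range b) := by
          rw [hone, List.map_cons, List.map_map]
          congr 1
          · show ((pvLastT (n + ((a + 0 : Nat) : Int)) (t :: rest)).getD " ").toList = t.2.2.toList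
            have ha0 : ((a + 0 : Nat) : Int) = ((a : Nat) : Int) := by push_cast; omega
            rw [ha0, hat]
            rfl
          · apply List.map_congr_left
            intro k _
            simp only [Function.comp_apply]
            have heq : pvLastT (n + ((a + (1 + k) : Nat) : Int)) (t :: rest)
                = pvLastT (t.1 + 1 + (k : Int)) rest := by
              rw [pvLastT_cons, if_neg (by push_cast; omega), Option.or_none]
              congr 1
              push_cast
              omega
            rw [heq]
        rw [List.map_map, hmap, List.flatten_cons]
        have hchunk : (csfdSpaces (t.1 - n) ++ t.2.2).toList
            = List.replicate a ' ' ++ t.2.2.toList := by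
          rw [String.toList_append, pv_spaces_toList]
        simp [hchunk, List.append_assoc]
        rw [hb]

theorem pv_tri_eq_nil (k : Int) (xs : List (Int × String)) (h : pvTri k xs = [])
    (pc : Int × String) (hpc : pc ∈ xs) : pc.1 < 0 := by
  induction xs generalizing k with
  | nil => simp at hpc
  | cons q r ih =>
      rcases q with ⟨p, c⟩
      simp only [pvTri] at h
      by_cases hp : 0 ≤ p
      · rw [if_pos hp] at h; simp at h
      · rw [if_neg hp] at h
        simp only [List.nil_append] at h
        rcases List.mem_cons.1 hpc with rfl | hpc'
        · simpa using by omega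
        · exact ih (k + 1) h hpc'

theorem pv_tri_exists (k : Int) (xs : List (Int × String)) (pc : Int × String)
    (hpc : pc ∈ xs) (hp : 0 ≤ pc.1) : ∃ t ∈ pvTri k xs, t.1 = pc.1 := by
  induction xs generalizing k with
  | nil => simp at hpc
  | cons q r ih =>
      rcases q with ⟨p, c⟩
      rcases List.mem_cons.1 hpc with rfl | hpc'
      · exact ⟨(p, k, c), by simp [pvTri, hp], rfl⟩
      · obtain ⟨t, ht, he⟩ := ih (k + 1) hpc'
        exact ⟨t, by simp [pvTri]; right; exact ht, he⟩

theorem pv_tri_fst_mem (k : Int) (xs : List (Int × String))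
    (t : Int × Int × String) (ht : t ∈ pvTri k xs) : ∃ pc ∈ xs, pc.1 = t.1 := by
  induction xs generalizing k with
  | nil => simp [pvTri] at ht
  | cons q r ih =>
      rcases q with ⟨p, c⟩
      simp only [pvTri] at ht
      rcases List.mem_append.1 ht with h1 | h2
      · by_cases hp : 0 ≤ p
        · rw [if_pos hp] at h1
          simp at h1
          subst h1
          exact ⟨(p, c), List.mem_cons_self, rfl⟩
        · rw [if_neg hp] at h1; simp at h1
      · obtain ⟨pc, hpc, he⟩ := ih (k + 1) h2
        exact ⟨pc, List.mem_cons_of_mem _ hpc, he⟩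

theorem pv_pvHi_ge (L : List (Int × Int × String)) (n : Int) (hlt : L.Pairwise pvLexLt) :
    ∀ x ∈ L, x.1 + 1 ≤ pvHi L n := by
  induction L generalizing n with
  | nil => intro x hx; simp at hx
  | cons t rest ih =>
      intro x hx
      have hh : pvHi (t :: rest) n = pvHi rest (t.1 + 1) := rfl
      rcases List.mem_cons.1 hx with rfl | hx'
      · rcases pv_pvHi_cases rest (x.1 + 1) with h | ⟨y, hy, hy'⟩
        · rw [hh, h]
        · have := (List.pairwise_cons.1 hlt).1 y hy
          rcases this with h | ⟨he, _⟩ <;> (rw [hh, hy']; omega)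
      · exact ih (t.1 + 1) (List.pairwise_cons.1 hlt).2 x hx'

theorem pv_S_pairwise (T : List (Int × Int × String))
    (hseq : T.Pairwise (fun a b => a.2.1 < b.2.1)) :
    (PySem.List.sorted T (fun t => toLex (t.1, t.2.1))).Pairwise pvLexLt := by
  have hle : (PySem.List.sorted T (fun t => toLex (t.1, t.2.1))).Pairwise
      (fun a b => toLex (a.1, a.2.1) ≤ toLex (b.1, b.2.1)) :=
    PySem.List.sorted_pairwise T (fun t => toLex (t.1, t.2.1))
  have hperm : (PySem.List.sorted T (fun t => toLex (t.1, t.2.1))).Perm T :=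
    PySem.List.sorted_perm T (fun t => toLex (t.1, t.2.1)) false
  have hneT : T.Pairwise (fun a b => a.2.1 ≠ b.2.1) := hseq.imp (fun h => ne_of_lt h)
  have hne : (PySem.List.sorted T (fun t => toLex (t.1, t.2.1))).Pairwise
      (fun a b => a.2.1 ≠ b.2.1) :=
    (List.Perm.pairwise_iff (fun h => h.symm) hperm).2 hneT
  refine (hle.and hne).imp ?_
  intro a b ⟨hab, hne'⟩
  rcases Prod.Lex.le_iff.1 hab with h | ⟨he, hs⟩
  · exact Or.inl h
  · exact Or.inr ⟨he, lt_of_le_of_ne hs hne'⟩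

theorem pv_S_last (T : List (Int × Int × String))
    (hseq : T.Pairwise (fun a b => a.2.1 < b.2.1)) (j : Int) :
    pvLastT j (PySem.List.sorted T (fun t => toLex (t.1, t.2.1))) = pvLastT j T := by
  rw [pvLastT_filter, pvLastT_filter]
  have hfeq : (PySem.List.sorted T (fun t => toLex (t.1, t.2.1))).filter (fun t => t.1 = j)
      = T.filter (fun t => t.1 = j) := by
    have hperm : ((PySem.List.sorted T (fun t => toLex (t.1, t.2.1))).filter
        (fun t => t.1 = j)).Perm (T.filter (fun t => t.1 = j)) :=
      (PySem.List.sorted_perm T (fun t => toLex (t.1, t.2.1)) false).filter _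
    have hp1 : ((PySem.List.sorted T (fun t => toLex (t.1, t.2.1))).filter
        (fun t => t.1 = j)).Pairwise (fun a b => a.2.1 < b.2.1) := by
      have := (pv_S_pairwise T hseq).filter (fun t => decide (t.1 = j))
      refine List.Pairwise.imp_of_mem ?_ this
      intro a b ha hb hab
      have ha' : a.1 = j := by simpa using (List.mem_filter.1 ha).2
      have hb' : b.1 = j := by simpa using (List.mem_filter.1 hb).2
      rcases hab with h | ⟨_, hs⟩
      · omega
      · exact hs
    have hp2 : (T.filter (fun t => t.1 = j)).Pairwise (fun a b => a.2.1 < b.2.1) :=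
      hseq.filter _
    exact List.Perm.eq_of_pairwise
      (fun a b _ _ h1 h2 => absurd h2 (not_lt.2 h1.le)) hp1 hp2 hperm
  rw [hfeq]

theorem pv_asgs_max_neg (xs : List (Int × String)) (h : ∀ pc ∈ xs, pc.1 < 0) :
    pvM xs = -1 := by
  unfold pvM
  rcases PySem.List.foldl_max_mem (xs.map (·.1)) (-1) with h1 | h1
  · exact h1
  · obtain ⟨pc, hpc, he⟩ := List.mem_map.1 h1
    have h2 := (PySem.List.le_foldl_max (xs.map (·.1)) (-1)).1
    have := h pc hpc
    omega

theorem pv_hi_eq (l : List (String × List Int)) :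
    pvHi (PySem.List.sorted (pvTri 0 (pvAsgs l)) (fun t => toLex (t.1, t.2.1))) 0
      = pvM (pvAsgs l) + 1 := by
  set T := pvTri 0 (pvAsgs l) with hT
  set S := PySem.List.sorted T (fun t => toLex (t.1, t.2.1)) with hS
  have hperm : S.Perm T := PySem.List.sorted_perm T (fun t => toLex (t.1, t.2.1)) false
  have hltS : S.Pairwise pvLexLt := pv_S_pairwise T (pv_tri_pairwise_seq 0 (pvAsgs l))
  cases hSnil : S with
  | nil =>
      have hTnil : T = [] := by
        have := hperm
        rw [hSnil] at this
        exact this.nil_eq.symm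
      have hneg : ∀ pc ∈ pvAsgs l, pc.1 < 0 := pv_tri_eq_nil 0 (pvAsgs l) hTnil
      rw [pv_asgs_max_neg (pvAsgs l) hneg]
      rfl
  | cons s0 srest =>
      rw [← hSnil]
      rcases pv_pvHi_cases S 0 with h | ⟨x, hx, hh⟩
      · exfalso
        have := pv_pvHi_ge S 0 hltS s0 (by rw [hSnil]; exact List.mem_cons_self)
        have h0 : 0 ≤ s0.1 := by
          have hs0T : s0 ∈ T := hperm.mem_iff.1 (by rw [hSnil]; exact List.mem_cons_self)
          exact (pv_tri_mem 0 (pvAsgs l) s0 hs0T).1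
        omega
      · -- pvHi S 0 = x.1 + 1 for some x ∈ S which is the maximal position
        rw [hh]
        have hxT : x ∈ T := hperm.mem_iff.1 hx
        have hx0 : 0 ≤ x.1 := (pv_tri_mem 0 (pvAsgs l) x hxT).1
        -- x.1 ≤ pvM
        obtain ⟨pc, hpc, hpce⟩ := pv_tri_fst_mem 0 (pvAsgs l) x hxT
        have hle1 : x.1 ≤ pvM (pvAsgs l) := by
          have := (PySem.List.le_foldl_max ((pvAsgs l).map (·.1)) (-1)).2 x.1
            (List.mem_map.2 ⟨pc, hpc, hpce⟩)
          exact this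
        -- pvM ≤ x.1
        have hle2 : pvM (pvAsgs l) ≤ x.1 := by
          rcases PySem.List.foldl_max_mem ((pvAsgs l).map (·.1)) (-1) with h1 | h1
          · unfold pvM; omega
          · obtain ⟨qc, hqc, hqe⟩ := List.mem_map.1 h1
            by_cases hq : 0 ≤ qc.1
            · obtain ⟨t, htT, hte⟩ := pv_tri_exists 0 (pvAsgs l) qc hqc hq
              have htS : t ∈ S := hperm.mem_iff.2 htT
              have := pv_pvHi_ge S 0 hltS t htS
              rw [hh] at this
              unfold pvM
              omega
            · unfold pvM; omega
        omega

-- A's output is the canonical per-position string list, joined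
theorem pv_len_eq (l : List (String × List Int)) :
    ((if ((pvAsgs l).foldl (fun d pc => d.insert pc.1 pc.2) (PySem.Dict.empty : PySem.Dict Int String)).size ≠ 0
        then ((PySem.List.max? ((pvAsgs l).foldl (fun d pc => d.insert pc.1 pc.2) (PySem.Dict.empty : PySem.Dict Int String)).keys (fun k => k)).getD (-1))
        else -1) + 1).toNat
      = ((pvM (pvAsgs l)) + 1).toNat := by
  set asgs := pvAsgs l with hasgs
  set ps := asgs.map (·.1) with hps
  set D := asgs.foldl (fun d pc => d.insert pc.1 pc.2) (PySem.Dict.empty : PySem.Dict Int String) with hD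
  have hkeys : D.keys = PySem.Set.ofList ps := by
    rw [hD]
    have := PySem.Dict.keys_foldl_insert_key asgs (fun pc => pc.1) (fun d pc => pc.2) PySem.Dict.empty
    simpa [hps] using this
  have hsize : D.size = D.keys.length := by
    simp [PySem.Dict.size, PySem.Dict.keys]
  have hBle := PySem.List.le_foldl_max ps (-1)
  have hBmem := PySem.List.foldl_max_mem ps (-1)
  by_cases hpsnil : ps = []
  · simp [hpsnil, hsize, hkeys, pvM, ← hps]
  · have hkne : D.keys ≠ [] := by
      rw [hkeys]
      obtain ⟨x, hx⟩ := List.exists_mem_of_ne_nil ps hpsnil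
      intro hcon
      have : x ∈ PySem.Set.ofList ps := (PySem.Set.mem_ofList ps x).2 hx
      simp [hcon] at this
    have hszne : D.size ≠ 0 := by
      rw [hsize]
      simpa using hkne
    obtain ⟨m, hm⟩ : ∃ m, PySem.List.max? D.keys (fun k => k) = some m := by
      cases hmx : PySem.List.max? D.keys (fun k => k) with
      | none => exact absurd ((PySem.List.max?_eq_none_iff _ _).1 hmx) hkne
      | some m => exact ⟨m, rfl⟩
    have hmmem : m ∈ ps := by
      have := PySem.List.max?_mem hm
      rw [hkeys, PySem.Set.mem_ofList] at this
      exact this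
    have hmax : ∀ y ∈ ps, y ≤ m := by
      intro y hy
      have : y ∈ D.keys := by rw [hkeys, PySem.Set.mem_ofList]; exact hy
      simpa using PySem.List.max?_isMax hm y this
    have h1 : m ≤ ps.foldl max (-1) := hBle.2 m hmmem
    have h2 : ps.foldl max (-1) = -1 ∨ ps.foldl max (-1) ≤ m := by
      rcases hBmem with h | h
      · exact Or.inl h
      · exact Or.inr (hmax _ h)
    rw [if_pos hszne, hm]
    simp only [Option.getD_some]
    unfold pvM
    rw [← hps]
    omega

theorem pv_A_eq (l : List (String × List Int)) :
    create_string_from_dict l = PySem.Str.join "" (pvCanonL l) := by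
  unfold create_string_from_dict
  have hd := pv_foldl_nested l (fun (d : PySem.Dict Int String) pc => d.insert pc.1 pc.2) PySem.Dict.empty
  simp only [hd]
  congr 1
  rw [PySem.List.foldl_append_singleton_eq_map, List.nil_append]
  have hlen := pv_len_eq l
  set asgs := pvAsgs l with hasgs
  set D := asgs.foldl (fun d pc => d.insert pc.1 pc.2) (PySem.Dict.empty : PySem.Dict Int String) with hD
  set hA : Int := if D.size ≠ 0 then (PySem.List.max? D.keys fun k => k).getD (-1) else -1 with hAdef
  apply List.ext_getElem?
  intro j
  by_cases hj : j < ((pvM asgs) + 1).toNat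
  · have hjA : j < (PySem.List.pyRange 0 (hA + 1) 1).length := by
      rw [PySem.List.length_pyRange_one]
      omega
    rw [List.getElem?_map, List.getElem?_eq_getElem hjA, PySem.List.getElem_pyRange_one]
    unfold pvCanonL
    rw [List.getElem?_map, List.getElem?_eq_getElem (by simpa using hj)]
    simp only [List.getElem_range, Option.map_some, Option.some.injEq]
    rw [PySem.Dict.getD_eq_get?_getD, hD, pv_dict_get? asgs PySem.Dict.empty _,
      PySem.Dict.get?_empty, pv_optfold, Option.or_none, zero_add]
  · rw [List.getElem?_eq_none, List.getElem?_eq_none]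
    · unfold pvCanonL
      rw [List.length_map, List.length_range, ← hasgs]
      omega
    · rw [List.length_map, PySem.List.length_pyRange_one]
      omega

theorem pv_B_eq (l : List (String × List Int)) :
    (create_string_from_dict_alt l).toList = ((pvCanonL l).map String.toList).flatten := by
  unfold create_string_from_dict_alt
  have ht := pv_foldl_nested (σ := List (Int × Int × String) × Int) l
    (fun acc pc => (if 0 ≤ pc.1 then acc.1 ++ [(pc.1, acc.2, pc.2)] else acc.1, acc.2 + 1))
    ([], 0)
  simp only [ht, pv_tri_fold, List.nil_append, pv_sorted2_eq]
  set T := pvTri 0 (pvAsgs l) with hT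
  set S := PySem.List.sorted T (fun t => toLex (t.1, t.2.1)) with hS
  have hperm : S.Perm T := PySem.List.sorted_perm T (fun t => toLex (t.1, t.2.1)) false
  have hseq : T.Pairwise (fun a b => a.2.1 < b.2.1) := pv_tri_pairwise_seq 0 (pvAsgs l)
  have hltS : S.Pairwise pvLexLt := pv_S_pairwise T hseq
  have hmemS : ∀ t ∈ S, (0 : Int) ≤ t.1 := by
    intro t htS
    exact (pv_tri_mem 0 (pvAsgs l) t (hperm.mem_iff.1 htS)).1
  rw [pv_join_toList, pv_render S 0 [] (le_refl 0) hmemS hltS]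
  simp only [List.map_nil, List.flatten_nil, List.nil_append]
  unfold pvCanonL
  rw [List.map_map]
  congr 1
  have hN : ((pvHi S 0) - 0).toNat = ((pvM (pvAsgs l)) + 1).toNat := by
    rw [hS, hT, pv_hi_eq]
    omega
  rw [hN]
  apply List.map_congr_left
  intro k hk
  have hk0 : (0 : Int) ≤ (k : Int) := by positivity
  rw [zero_add, pv_S_last T hseq, pv_tri_last (pvAsgs l) 0 (k : Int) hk0]
  rfl

-- ===== VERDICT (by name: the statement is the Claim_ definition above) =====
theorem create_string_from_dict_spec : Claim_equal_create_string_from_dict := by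
  intro l _
  unfold Spec_create_string_from_dict
  apply String.toList_inj.mp
  rw [pv_B_eq, pv_A_eq, pv_join_toList]
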